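-- pv_equiv track=rewrite | github.com/jpakdel/lyric-generator | sentence_ranker.py | score_sent
-- ===== SOURCE A (Python) =====
-- def score_sent(data):
--     raw = 0
--     for item in data["actual"]:
--         for i, val in enumerate(data["actual"][item]):
--             mod = (i%3)+1
--             if mod == 3:
--                 mod = 10
--             raw += mod*val
--     return raw
-- ===== SOURCE B (Python) =====
-- def score_sent(data):
--     # Residue decomposition: split each sequence by index mod 3 with strided
--     # slices and sum each group once with its weight (1, 2, 10).
--     total = 0
--     for seq in data["actual"].values():
--         total += sum(seq[0::3]) + 2 * sum(seq[1::3]) + 10 * sum(seq[2::3])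
--     return total
-- ===== Notes on version B (the rewrite author's own statement) =====
-- stated objective: alternative
-- what changed: Replaces A's single enumerate pass with per-index mod/if weight arithmetic by three residue-grouped strided-slice passes per sequence (sum(seq[0::3]) + 2*sum(seq[1::3]) + 10*sum(seq[2::3])), eliminating per-element weight computation.
import Mathlib
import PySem

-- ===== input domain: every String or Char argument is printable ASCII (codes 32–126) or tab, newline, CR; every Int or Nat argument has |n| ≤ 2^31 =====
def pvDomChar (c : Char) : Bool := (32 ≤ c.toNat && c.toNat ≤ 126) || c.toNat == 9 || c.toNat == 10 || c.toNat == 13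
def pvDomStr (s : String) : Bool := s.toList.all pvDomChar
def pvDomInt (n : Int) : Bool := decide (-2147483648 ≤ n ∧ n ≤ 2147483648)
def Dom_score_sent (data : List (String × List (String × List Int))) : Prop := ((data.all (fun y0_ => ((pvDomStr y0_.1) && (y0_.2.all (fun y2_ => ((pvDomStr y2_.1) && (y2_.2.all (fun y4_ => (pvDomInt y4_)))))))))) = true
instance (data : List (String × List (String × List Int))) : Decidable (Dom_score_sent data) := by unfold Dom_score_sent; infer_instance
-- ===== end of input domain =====

-- B replaces A's enumerate pass with per-index weight arithmetic by three residue-grouped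
-- strided-slice passes per sequence (alternative decomposition, same cost).

-- ===== PORT A =====
-- for item in data["actual"]: for i, val in enumerate(data["actual"][item]): …
def score_sent (data : List (String × List (String × List Int))) : Int :=
  match (PySem.Dict.ofList data).get? "actual" with
  | none => 0  -- unreachable under Pre_score_sent (Python raises KeyError)
  | some actualL =>
    let d := PySem.Dict.ofList actualL
    d.keys.foldl (fun raw item =>
      (PySem.List.enumerate (d.getD item []) 0).foldl (fun raw iv =>
        let m : Int := PySem.Int.mod iv.1 3 + 1
        let m : Int := if m == 3 then 10 else m
        raw + m * iv.2) raw) 0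

-- ===== PORT B =====
-- total += sum(seq[0::3]) + 2*sum(seq[1::3]) + 10*sum(seq[2::3]) over data["actual"].values()
def score_sent_alt (data : List (String × List (String × List Int))) : Int :=
  match (PySem.Dict.ofList data).get? "actual" with
  | none => 0  -- unreachable under Pre_score_sent (Python raises KeyError)
  | some actualL =>
    (PySem.Dict.ofList actualL).values.foldl (fun total seq =>
      total + (((PySem.List.slice? seq (some 0) none 3).getD []).sum
        + 2 * ((PySem.List.slice? seq (some 1) none 3).getD []).sum
        + 10 * ((PySem.List.slice? seq (some 2) none 3).getD []).sum)) 0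

-- ===== PRECONDITION & SPEC =====
-- Pre_ excludes exactly the inputs without an "actual" key, on which Python A raises KeyError.
def Pre_score_sent (data : List (String × List (String × List Int))) : Prop :=
  (PySem.Dict.ofList data).contains "actual" = true
instance (data : List (String × List (String × List Int))) : Decidable (Pre_score_sent data) := by unfold Pre_score_sent; infer_instance
def pvWitness_score_sent : (List (String × List (String × List Int))) :=
  [("actual", [("hello world", [1, 2, 3, 4]), ("bye", [5])])]

def Spec_score_sent (data : List (String × List (String × List Int))) (out : Int) : Prop := out = score_sent_alt data
instance (data : List (String × List (String × List Int))) (out : Int) : Decidable (Spec_score_sent data out) := by unfold Spec_score_sent; infer_instance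

-- ===== CLAIM (what is proved, stated in full; the proofs are below) =====
def Claim_equal_score_sent : Prop := ∀ (data : List (String × List (String × List Int))), Dom_score_sent data → Pre_score_sent data → Spec_score_sent data (score_sent data)

-- ===== LEMMAS AND PROOFS =====

-- the elements of xs at indices ≡ 0 (mod 3)
def every3 : List Int → List Int
  | [] => []
  | [x] => [x]
  | [x, _] => [x]
  | x :: _ :: _ :: rest => x :: every3 rest

-- common reference value: the weighted total of one sequence, three elements at a time
def chunkSpec : List Int → Int
  | [] => 0
  | [x] => x
  | [x, y] => x + 2 * y
  | x :: y :: z :: rest => x + 2 * y + 10 * z + chunkSpec rest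

theorem every3_cons (a : Int) (t : List Int) : every3 (a :: t) = a :: every3 (t.drop 2) := by
  match t with
  | [] => simp [every3]
  | [b] => simp [every3]
  | b :: c :: r => simp [every3]

theorem filterMap_range_every3 (xs : List Int) :
    ∀ (c s : Nat), c = (xs.length - s + 2) / 3 →
    List.filterMap (fun k : Nat => xs[s + 3 * k]?) (List.range c) = every3 (xs.drop s) := by
  intro c
  induction c with
  | zero =>
    intro s hc
    have : xs.length ≤ s := by omega
    simp [List.drop_eq_nil_of_le this, every3]
  | succ c ih =>
    intro s hc
    have hs : s < xs.length := by omega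
    rw [List.range_succ_eq_map, List.filterMap_cons, List.filterMap_map]
    have hfun : ((fun k : Nat => xs[s + 3 * k]?) ∘ Nat.succ)
        = (fun k : Nat => xs[(s + 3) + 3 * k]?) := by
      funext k
      have : s + 3 * Nat.succ k = (s + 3) + 3 * k := by omega
      simp [Function.comp, this]
    rw [hfun, ih (s + 3) (by omega)]
    rw [List.drop_eq_getElem_cons hs, every3_cons]
    rw [List.drop_drop, show s + 1 + 2 = s + 3 by omega]
    simp [hs]

theorem slice3_eq (xs : List Int) (r : Nat) :
    PySem.List.slice? xs (some (r : Int)) none 3 = some (every3 (xs.drop r)) := by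
  simp only [PySem.List.slice?, PySem.List.sliceIndices]
  norm_num
  simp only [if_neg (show ¬((r : Int) < 0) by omega)]
  by_cases hrl : r < xs.length
  · rw [min_eq_left (by exact_mod_cast Nat.le_of_lt hrl)]
    rw [if_pos (by exact_mod_cast hrl)]
    have hc : (((xs.length : Int) - (r : Int) + 3 - 1) / 3).toNat = (xs.length - r + 2) / 3 := by
      omega
    have hfun : (fun x : Nat => xs[((r : Int) + 3 * (x : Int)).toNat]?)
        = (fun x : Nat => xs[r + 3 * x]?) := by
      funext x
      rw [show ((r : Int) + 3 * (x : Int)).toNat = r + 3 * x by omega]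
    rw [hc, hfun]
    exact filterMap_range_every3 xs _ r rfl
  · rw [min_eq_right (by exact_mod_cast Nat.le_of_not_lt hrl)]
    rw [if_neg (by omega)]
    have : xs.drop r = [] := List.drop_eq_nil_of_le (Nat.le_of_not_lt hrl)
    simp [this, every3]

-- A's inner weight from the index equals chunkSpec, when the start index is a multiple of 3
theorem foldA_eq (seq : List Int) :
    ∀ (m : Nat) (raw : Int),
    (PySem.List.enumerate seq (3 * (m : Int))).foldl (fun raw iv =>
        let m : Int := PySem.Int.mod iv.1 3 + 1
        let m : Int := if m == 3 then 10 else m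
        raw + m * iv.2) raw = raw + chunkSpec seq := by
  induction seq using chunkSpec.induct with
  | case1 =>
    intro m raw
    simp [PySem.List.enumerate, chunkSpec]
  | case2 x =>
    intro m raw
    simp [PySem.List.enumerate, chunkSpec]
  | case3 x y =>
    intro m raw
    simp [PySem.List.enumerate, chunkSpec]
    ring
  | case4 x y z rest ih =>
    intro m raw
    have h1 : PySem.Int.mod (3 * (m : Int)) 3 = 0 := by
      rw [PySem.Int.mod_eq_emod_of_pos (by norm_num)]; omega
    have h2 : PySem.Int.mod (3 * (m : Int) + 1) 3 = 1 := by
      rw [PySem.Int.mod_eq_emod_of_pos (by norm_num)]; omega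
    have h3 : PySem.Int.mod (3 * (m : Int) + 1 + 1) 3 = 2 := by
      rw [PySem.Int.mod_eq_emod_of_pos (by norm_num)]; omega
    have hnext : (3 * (m : Int) + 1 + 1 + 1) = 3 * ((m + 1 : Nat) : Int) := by push_cast; ring
    rw [PySem.List.enumerate_cons, PySem.List.enumerate_cons, PySem.List.enumerate_cons, hnext]
    simp only [List.foldl_cons]
    rw [ih (m + 1)]
    simp only [h1, h2, h3]
    norm_num [chunkSpec]
    ring

-- B's three residue sums equal chunkSpec
theorem residue_sum (seq : List Int) :
    (every3 seq).sum + 2 * (every3 (seq.drop 1)).sum + 10 * (every3 (seq.drop 2)).sum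
      = chunkSpec seq := by
  induction seq using chunkSpec.induct with
  | case1 => simp [every3, chunkSpec]
  | case2 x => simp [every3, chunkSpec]
  | case3 x y => simp [every3, chunkSpec]
  | case4 x y z rest ih =>
    have e0 : every3 (x :: y :: z :: rest) = x :: every3 rest := by simp [every3]
    have e1 : every3 ((x :: y :: z :: rest).drop 1) = y :: every3 (rest.drop 1) := by
      rw [List.drop_one, List.tail_cons, every3_cons]; rfl
    have e2 : every3 ((x :: y :: z :: rest).drop 2) = z :: every3 (rest.drop 2) := by
      rw [show (x :: y :: z :: rest).drop 2 = z :: rest from rfl, every3_cons]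
    rw [e0, e1, e2]
    simp only [List.sum_cons, chunkSpec]
    rw [← ih]
    ring

-- Folding A's body over the dict's keys with lookup equals folding B's body over its values.
theorem pv_dict (actualL : List (String × List Int)) :
    (PySem.Dict.ofList actualL).keys.foldl (fun raw item =>
      (PySem.List.enumerate ((PySem.Dict.ofList actualL).getD item []) 0).foldl (fun raw iv =>
        let m : Int := PySem.Int.mod iv.1 3 + 1
        let m : Int := if m == 3 then 10 else m
        raw + m * iv.2) raw) 0
    = (PySem.Dict.ofList actualL).values.foldl (fun total seq =>
      total + (((PySem.List.slice? seq (some 0) none 3).getD []).sum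
        + 2 * ((PySem.List.slice? seq (some 1) none 3).getD []).sum
        + 10 * ((PySem.List.slice? seq (some 2) none 3).getD []).sum)) 0 := by
  set d := PySem.Dict.ofList actualL with hd
  have hnd : d.keys.Nodup := PySem.Dict.nodup_keys_ofList actualL
  have hitems : d.items = d.keys.map (fun k => (k, d.getD k [])) :=
    PySem.Dict.items_eq_map_keys d hnd []
  have hvals : d.values = d.items.map (·.2) := rfl
  rw [hvals, hitems, List.map_map, List.foldl_map]
  have hfun : (fun (raw : Int) (item : String) =>
      (PySem.List.enumerate (d.getD item []) 0).foldl (fun raw iv =>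
        let m : Int := PySem.Int.mod iv.1 3 + 1
        let m : Int := if m == 3 then 10 else m
        raw + m * iv.2) raw)
      = (fun (total : Int) (item : String) =>
        total + ((((PySem.List.slice? (d.getD item []) (some 0) none 3).getD []).sum
          + 2 * ((PySem.List.slice? (d.getD item []) (some 1) none 3).getD []).sum
          + 10 * ((PySem.List.slice? (d.getD item []) (some 2) none 3).getD []).sum))) := by
    funext raw item
    have hA := foldA_eq (d.getD item []) 0 raw
    simp only [Nat.cast_zero, mul_zero] at hA
    rw [hA]
    have s0 := slice3_eq (d.getD item []) 0
    have s1 := slice3_eq (d.getD item []) 1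
    have s2 := slice3_eq (d.getD item []) 2
    simp only [Nat.cast_zero, Nat.cast_one, Nat.cast_ofNat] at s0 s1 s2
    rw [s0, s1, s2]
    simp only [Option.getD_some, List.drop_zero]
    rw [residue_sum]
  rw [hfun]
  simp [Function.comp]

-- ===== VERDICT (by name: the statement is the Claim_ definition above) =====
theorem score_sent_spec : Claim_equal_score_sent := by
  intro data _ _
  unfold Spec_score_sent score_sent score_sent_alt
  cases hget : (PySem.Dict.ofList data).get? "actual" with
  | none => rfl
  | some actualL => exact pv_dict actualL
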